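-- pv_equiv track=rewrite | github.com/mdliss/AssessMax | backend/app/nlp/evidence_extraction.py | _build_line_map
-- ===== SOURCE A (Python) =====
-- from typing import Dict, List, Optional, Tuple
--
-- def _build_line_map(text: str) -> List[Tuple[int, int]]:
--     """
--     Build a map of character positions to line numbers.
--
--     Args:
--         text: Input text
--
--     Returns:
--         List of (start_char, end_char) tuples for each line
--     """
--     line_map = []
--     current_pos = 0
--
--     for line in text.split("\n"):
--         line_length = len(line) + 1  # +1 for newline
--         line_map.append((current_pos, current_pos + line_length))
--         current_pos += line_length
--
--     return line_map
-- ===== SOURCE B (Python) =====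
-- from typing import Dict, List, Optional, Tuple
--
-- def _build_line_map(text: str) -> List[Tuple[int, int]]:
--     offsets = [0] + [i + 1 for i, c in enumerate(text) if c == "\n"] + [len(text) + 1]
--     return list(zip(offsets, offsets[1:]))
-- ===== Notes on version B (the rewrite author's own statement) =====
-- stated objective: alternative
-- what changed: Replaces the split-then-running-accumulator loop with a boundary-offset table (0, each newline index + 1, len(text)+1) built by a direct character scan, then pairs adjacent offsets with zip.
import Mathlib
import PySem

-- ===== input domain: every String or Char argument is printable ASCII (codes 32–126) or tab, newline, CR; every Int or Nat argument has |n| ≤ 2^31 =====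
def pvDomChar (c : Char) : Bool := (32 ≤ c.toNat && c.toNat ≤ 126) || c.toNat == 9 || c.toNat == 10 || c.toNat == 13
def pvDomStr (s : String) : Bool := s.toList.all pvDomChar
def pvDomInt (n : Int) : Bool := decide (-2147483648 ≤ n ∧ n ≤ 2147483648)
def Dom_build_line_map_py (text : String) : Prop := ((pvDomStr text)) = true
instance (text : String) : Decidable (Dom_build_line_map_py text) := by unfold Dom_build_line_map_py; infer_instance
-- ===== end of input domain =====

-- B replaces A's split-then-running-accumulator loop by a boundary-offset table
-- (0, each newline index + 1, len+1) paired adjacently with zip (objective: alternative).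

-- ===== PORT A =====
def build_line_map_py (text : String) : List (Int × Int) :=
  let st := (PySem.Chars.splitOn text.toList ['\n']).foldl
    (fun (st : List (Int × Int) × Int) line =>
      let lineLength : Int := (line.length : Int) + 1
      (st.1 ++ [(st.2, st.2 + lineLength)], st.2 + lineLength))
    ([], 0)
  st.1

-- ===== PORT B =====
def build_line_map_py_alt (text : String) : List (Int × Int) :=
  let cs := text.toList
  let offsets : List Int :=
    0 :: ((PySem.List.enumerate cs).filterMap
            (fun p => if p.2 = '\n' then some (p.1 + 1) else none)
          ++ [(cs.length : Int) + 1])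
  offsets.zip offsets.tail

-- ===== PRECONDITION & SPEC =====
def Spec_build_line_map_py (text : String) (out : List (Int × Int)) : Prop := out = build_line_map_py_alt text
instance (text : String) (out : List (Int × Int)) : Decidable (Spec_build_line_map_py text out) := by unfold Spec_build_line_map_py; infer_instance

-- ===== CLAIM (what is proved, stated in full; the proofs are below) =====
def Claim_equal_build_line_map_py : Prop := ∀ (text : String), Dom_build_line_map_py text → Spec_build_line_map_py text (build_line_map_py text)

-- ===== LEMMAS AND PROOFS =====

-- reference splitter: Python's text.split("\n") with an explicit current-piece accumulator
def pvSplit (pre : List Char) : List Char → List (List Char)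
  | [] => [pre]
  | c :: rest => if c = '\n' then pre :: pvSplit [] rest else pvSplit (pre ++ [c]) rest

-- (start, start+L) ranges of consecutive lengths
def pvRanges (p : Int) : List Int → List (Int × Int)
  | [] => []
  | L :: Ls => (p, p + L) :: pvRanges (p + L) Ls

-- cumulative ends of consecutive lengths
def pvCum (p : Int) : List Int → List Int
  | [] => []
  | L :: Ls => (p + L) :: pvCum (p + L) Ls

-- positions-after-newlines, structurally
def pvNl (s : Int) : List Char → List Int
  | [] => []
  | c :: rest => if c = '\n' then (s + 1) :: pvNl (s + 1) rest else pvNl (s + 1) rest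

theorem pv_go_eq (fuel : Nat) (l cur : List Char) (acc : List (List Char))
    (h : l.length < fuel) :
    PySem.Chars.splitOn.go ['\n'] fuel l cur acc
      = acc.reverse ++ pvSplit cur.reverse l := by
  induction fuel generalizing l cur acc with
  | zero => omega
  | succ n ih =>
    cases l with
    | nil => rw [PySem.Chars.splitOn.go.eq_def]; simp [pvSplit]
    | cons c rest =>
      by_cases hc : c = '\n'
      · subst hc
        rw [PySem.Chars.splitOn.go.eq_def]
        simp only [List.isPrefixOf, List.length_cons, List.length_nil]
        rw [if_pos (by decide)]
        simp only [List.drop_succ_cons, List.drop_zero, Nat.zero_add]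
        rw [ih rest [] ((cur.reverse) :: acc) (by simp at h ⊢; omega)]
        simp [pvSplit]
      · have hstep : PySem.Chars.splitOn.go ['\n'] (n + 1) (c :: rest) cur acc
            = PySem.Chars.splitOn.go ['\n'] n rest (c :: cur) acc := by
          rw [PySem.Chars.splitOn.go.eq_def]
          simp [List.isPrefixOf, Ne.symm hc]
        rw [hstep, ih rest (c :: cur) acc (by simp at h ⊢; omega)]
        simp [pvSplit, hc]

theorem pv_splitOn_eq (cs : List Char) :
    PySem.Chars.splitOn cs ['\n'] = pvSplit [] cs := by
  unfold PySem.Chars.splitOn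
  rw [pv_go_eq (cs.length + 1) cs [] [] (by omega)]
  rfl

theorem pv_foldA (lines : List (List Char)) (acc : List (Int × Int)) (p : Int) :
    (lines.foldl
      (fun (st : List (Int × Int) × Int) line =>
        let lineLength : Int := (line.length : Int) + 1
        (st.1 ++ [(st.2, st.2 + lineLength)], st.2 + lineLength))
      (acc, p)).1
      = acc ++ pvRanges p (lines.map fun l => (l.length : Int) + 1) := by
  induction lines generalizing acc p with
  | nil => simp [pvRanges]
  | cons l rest ih =>
    simp only [List.foldl, List.map, pvRanges]
    rw [ih]
    simp

theorem pv_nl_eq (cs : List Char) (s : Int) :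
    (PySem.List.enumerate cs s).filterMap
        (fun p => if p.2 = '\n' then some (p.1 + 1) else none) = pvNl s cs := by
  induction cs generalizing s with
  | nil => simp [PySem.List.enumerate_nil, pvNl]
  | cons c rest ih =>
    rw [PySem.List.enumerate_cons]
    by_cases hc : c = '\n' <;>
      simp [pvNl, hc, ih]

theorem pv_nl (cs : List Char) (s : Int) (pre : List Char) :
    pvNl s cs ++ [s + (cs.length : Int) + 1]
      = pvCum (s - (pre.length : Int)) ((pvSplit pre cs).map fun l => (l.length : Int) + 1) := by
  induction cs generalizing s pre with
  | nil =>
    simp [pvNl, pvSplit, pvCum]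
    ring
  | cons c rest ih =>
    by_cases hc : c = '\n'
    · subst hc
      have h1 := ih (s + 1) []
      simp only [List.length_nil, Int.natCast_zero, sub_zero] at h1
      have e1 : pvNl s ('\n' :: rest) = (s + 1) :: pvNl (s + 1) rest := by simp [pvNl]
      have e2 : pvSplit pre ('\n' :: rest) = pre :: pvSplit [] rest := by simp [pvSplit]
      rw [e1, e2]
      simp only [List.map_cons, pvCum, List.cons_append]
      congr 1
      · ring
      · have e3 : s - (pre.length : Int) + ((pre.length : Int) + 1) = s + 1 := by ring
        rw [e3, ← h1]
        congr 2
        push_cast [List.length_cons]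
        ring
    · have h1 := ih (s + 1) (pre ++ [c])
      have e1 : pvNl s (c :: rest) = pvNl (s + 1) rest := by simp [pvNl, hc]
      have e2 : pvSplit pre (c :: rest) = pvSplit (pre ++ [c]) rest := by simp [pvSplit, hc]
      rw [e1, e2]
      have e3 : s - (pre.length : Int) = s + 1 - (((pre ++ [c]).length : Nat) : Int) := by
        simp [List.length_append]
      rw [e3, ← h1]
      congr 2
      push_cast [List.length_cons]
      ring

theorem pv_zip (Ls : List Int) (x : Int) :
    List.zip (x :: pvCum x Ls) (pvCum x Ls) = pvRanges x Ls := by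
  induction Ls generalizing x with
  | nil => simp [pvCum, pvRanges]
  | cons L rest ih =>
    simp only [pvCum, pvRanges, List.zip, List.zipWith]
    have := ih (x + L)
    simp only [List.zip] at this
    rw [this]

-- ===== VERDICT (by name: the statement is the Claim_ definition above) =====
theorem build_line_map_py_spec : Claim_equal_build_line_map_py := by
  intro text _
  unfold Spec_build_line_map_py build_line_map_py build_line_map_py_alt
  simp only []
  rw [pv_splitOn_eq, pv_foldA]
  have hnl := pv_nl text.toList 0 []
  simp only [List.length_nil, Int.natCast_zero, sub_zero, zero_add] at hnl
  simp only [List.nil_append, List.tail_cons]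
  rw [pv_nl_eq, hnl, pv_zip]
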